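-- pv_equiv track=rewrite | github.com/hunnam5220/Programmers | Kakao_blind_dump_/01. First/01. 2018 카카오 블라인드 테스트/05. [1차] 캐시.py | solution
-- ===== SOURCE A (Python) =====
-- def solution(cacheSize, cities):
--     cache = []
--     answer = 0
--     LRU = {
--     }
--     for i in cities:
--         i = i.lower()
--
--         if i not in LRU:
--             LRU[i] = 0
--
--         if cacheSize != 0:
--             if i not in cache:
--                 cache.append(i)
--                 answer += 5
--             else:
--                 LRU[i] += 1
--                 answer += 1
--
--             if len(cache) > cacheSize:
--                 rm = min(LRU)
--                 cache.remove(rm)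
--                 LRU.pop(rm)
--         else:
--             answer += 5
--
--     return answer
-- ===== SOURCE B (Python) =====
-- def solution(cacheSize, cities):
--     # Sorted-structure simulation: hash-set membership + descending-sorted list,
--     # so the evicted (lexicographically smallest) city is desc[-1]; no min/remove scans.
--     if cacheSize == 0:
--         return 5 * len(cities)
--     present = set()
--     desc = []  # cached cities, distinct, kept sorted in descending order
--     answer = 0
--     for city in cities:
--         c = city.lower()
--         if c in present:
--             answer += 1
--         else:
--             answer += 5
--             present.add(c)
--             k = 0
--             while k < len(desc) and desc[k] > c:
--                 k += 1
--             desc.insert(k, c)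
--             if len(desc) > cacheSize:
--                 present.remove(desc.pop())
--     return answer
-- ===== Notes on version B (the rewrite author's own statement) =====
-- stated objective: alternative
-- what changed: Replaces the unsorted cache list + dict with a hash set for membership and a descending-sorted list, so each eviction pops the last element instead of scanning min(LRU) and cache.remove, and hits cost O(1) instead of a linear scan.
import Mathlib
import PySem

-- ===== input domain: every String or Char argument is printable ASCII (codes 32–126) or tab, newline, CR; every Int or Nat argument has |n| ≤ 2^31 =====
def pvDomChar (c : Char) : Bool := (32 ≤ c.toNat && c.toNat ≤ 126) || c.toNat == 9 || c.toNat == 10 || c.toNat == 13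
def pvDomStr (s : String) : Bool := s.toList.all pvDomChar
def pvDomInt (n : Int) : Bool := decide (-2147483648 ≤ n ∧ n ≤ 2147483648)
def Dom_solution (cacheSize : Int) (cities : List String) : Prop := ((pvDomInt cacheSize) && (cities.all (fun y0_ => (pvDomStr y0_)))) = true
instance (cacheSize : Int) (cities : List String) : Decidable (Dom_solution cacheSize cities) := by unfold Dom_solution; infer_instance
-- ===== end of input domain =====

-- B replaces A's unsorted cache list + min(LRU)/remove scans by a hash set plus a
-- descending-sorted list whose last element is the eviction victim (objective: alternative).

-- ===== PORT A =====
-- one loop iteration of A: state = (cache, answer, LRU)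
def solutionStep (cacheSize : Int) (st : List String × Int × PySem.Dict String Int)
    (city : String) : List String × Int × PySem.Dict String Int :=
  let i := PySem.Str.lower city
  let lru := if st.2.2.contains i = false then st.2.2.insert i 0 else st.2.2
  if cacheSize ≠ 0 then
    let s1 :=
      if st.1.contains i = false then (st.1 ++ [i], st.2.1 + 5, lru)
      else (st.1, st.2.1 + 1, lru.modify i 0 (· + 1))
    if (s1.1.length : Int) > cacheSize then
      match PySem.List.min? s1.2.2.keys (fun x => x) with
      | some rm =>
        match PySem.List.remove? s1.1 rm with
        | some cache' => (cache', s1.2.1, s1.2.2.erase rm)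
        | none => (s1.1, s1.2.1, s1.2.2.erase rm)  -- unreachable (Python ValueError)
      | none => s1  -- unreachable (min of an empty dict)
    else s1
  else (st.1, st.2.1 + 5, lru)

def solution (cacheSize : Int) (cities : List String) : Int :=
  (cities.foldl (solutionStep cacheSize) ([], 0, PySem.Dict.empty)).2.1

-- ===== PORT B =====
-- transcription of B's while-loop "find k, insert at k": insert c before the first
-- element not greater than c, keeping the list sorted in descending order
def insertDesc (c : String) : List String → List String
  | [] => [c]
  | x :: xs => if c < x then x :: insertDesc c xs else c :: x :: xs

-- one loop iteration of B: state = (present, desc, answer)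
def solutionAltStep (cacheSize : Int) (st : PySem.Set String × List String × Int)
    (city : String) : PySem.Set String × List String × Int :=
  let c := PySem.Str.lower city
  if PySem.Set.contains st.1 c then (st.1, st.2.1, st.2.2 + 1)
  else
    let present := PySem.Set.add st.1 c
    let desc := insertDesc c st.2.1
    if (desc.length : Int) > cacheSize then
      match PySem.List.pop? desc with
      | some (last, rest) =>
        match PySem.Set.remove? present last with
        | some p => (p, rest, st.2.2 + 5)
        | none => (present, rest, st.2.2 + 5)  -- unreachable (Python KeyError)
      | none => (present, desc, st.2.2 + 5)  -- unreachable (pop from empty list)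
    else (present, desc, st.2.2 + 5)

def solution_alt (cacheSize : Int) (cities : List String) : Int :=
  if cacheSize = 0 then 5 * (cities.length : Int)
  else (cities.foldl (solutionAltStep cacheSize) (PySem.Set.empty, [], 0)).2.2

-- ===== PRECONDITION & SPEC =====
def Spec_solution (cacheSize : Int) (cities : List String) (out : Int) : Prop := out = solution_alt cacheSize cities
instance (cacheSize : Int) (cities : List String) (out : Int) : Decidable (Spec_solution cacheSize cities out) := by unfold Spec_solution; infer_instance

-- ===== CLAIM (what is proved, stated in full; the proofs are below) =====
def Claim_equal_solution : Prop := ∀ (cacheSize : Int) (cities : List String), Dom_solution cacheSize cities → Spec_solution cacheSize cities (solution cacheSize cities)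

-- ===== LEMMAS AND PROOFS =====

-- A with cacheSize = 0 just adds 5 per city
lemma foldA_zero (cities : List String) :
    ∀ (st : List String × Int × PySem.Dict String Int),
      (cities.foldl (solutionStep 0) st).2.1 = st.2.1 + 5 * cities.length := by
  induction cities with
  | nil => intro st; simp
  | cons city rest ih =>
    intro st
    rw [List.foldl_cons, ih]
    simp [solutionStep]
    ring

lemma insertDesc_perm (c : String) (l : List String) : (insertDesc c l).Perm (c :: l) := by
  induction l with
  | nil => simp [insertDesc]
  | cons x xs ih =>
    by_cases h : c < x
    · simpa [insertDesc, h] using ((ih.cons x).trans (List.Perm.swap c x xs))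
    · simp [insertDesc, h]

lemma insertDesc_pairwise {c : String} {l : List String} (hp : l.Pairwise (· > ·))
    (hc : c ∉ l) : (insertDesc c l).Pairwise (· > ·) := by
  induction l with
  | nil => simp [insertDesc]
  | cons x xs ih =>
    rcases List.pairwise_cons.mp hp with ⟨hx, hxs⟩
    have hcx : c ≠ x := fun h => hc (by simp [h])
    have hcxs : c ∉ xs := fun h => hc (by simp [h])
    simp only [insertDesc]
    by_cases h : c < x
    · rw [if_pos h]
      refine List.pairwise_cons.mpr ⟨?_, ih hxs hcxs⟩
      intro y hy
      have : y ∈ c :: xs := (insertDesc_perm c xs).subset hy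
      rcases List.mem_cons.mp this with rfl | hmem
      · exact h
      · exact hx y hmem
    · rw [if_neg h]
      have hxc : x < c := lt_of_le_of_ne (not_lt.mp h) (fun e => hcx e.symm)
      refine List.pairwise_cons.mpr ⟨?_, hp⟩
      intro y hy
      rcases List.mem_cons.mp hy with rfl | hmem
      · exact hxc
      · exact lt_trans (hx y hmem) hxc

lemma pairwise_gt_getLast :
    ∀ (l : List String) (h : l ≠ []), l.Pairwise (· > ·) →
      ∀ y ∈ l, y ≠ l.getLast h → l.getLast h < y := by
  intro l
  induction l with
  | nil => intro h; exact absurd rfl h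
  | cons x t ih =>
    intro h hp y hy hne
    rcases List.pairwise_cons.mp hp with ⟨hx, ht⟩
    cases t with
    | nil =>
      rcases List.mem_singleton.mp hy with rfl
      simp at hne
    | cons a s =>
      have htne : a :: s ≠ [] := by simp
      rw [List.getLast_cons htne] at hne ⊢
      rcases List.mem_cons.mp hy with rfl | hmem
      · exact hx _ (List.getLast_mem htne)
      · exact ih htne ht y hmem hne

-- min over any list with the same elements as a descending-sorted list is its last element
lemma min?_eq_getLast {keys l : List String} (h : l ≠ []) (hp : l.Pairwise (· > ·))
    (hperm : l.Perm keys) :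
    PySem.List.min? keys (fun x => x) = some (l.getLast h) := by
  cases hmin : PySem.List.min? keys (fun x => x) with
  | none =>
    have : keys = [] := (PySem.List.min?_eq_none_iff keys _).mp hmin
    subst this
    exact absurd hperm.eq_nil h
  | some m =>
    have hm : m ∈ l := hperm.mem_iff.mpr (PySem.List.min?_mem hmin)
    by_cases he : m = l.getLast h
    · rw [he]
    · have h1 : l.getLast h < m := pairwise_gt_getLast l h hp m hm he
      have h2 : m ≤ l.getLast h :=
        PySem.List.min?_isMin hmin _ (hperm.mem_iff.mp (List.getLast_mem h))
      exact absurd h1 (not_lt.mpr h2)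

lemma keys_erase_eq {ν : Type} (d : PySem.Dict String ν) (k : String) :
    (d.erase k).keys = d.keys.filter (fun x => x != k) := by
  show (d.items.filter _).map _ = (d.items.map _).filter _
  induction d.items with
  | nil => rfl
  | cons p t ih =>
    by_cases h : p.1 = k
    · simp [h, ih]
    · simp [h, ih]

-- step characterisations of A ------------------------------------------------
lemma stepA_hit (cacheSize : Int) (hcs : ¬ cacheSize = 0) (cache : List String) (ans : Int)
    (lru : PySem.Dict String Int) (city : String)
    (hmem : PySem.Str.lower city ∈ cache)
    (hk : lru.contains (PySem.Str.lower city) = true)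
    (hlen : ¬ cacheSize < (cache.length : Int)) :
    solutionStep cacheSize (cache, ans, lru) city
      = (cache, ans + 1, lru.modify (PySem.Str.lower city) 0 (· + 1)) := by
  simp [solutionStep, hcs, hmem, hk, hlen]

lemma stepA_miss_noevict (cacheSize : Int) (hcs : ¬ cacheSize = 0) (cache : List String)
    (ans : Int) (lru : PySem.Dict String Int) (city : String)
    (hmem : PySem.Str.lower city ∉ cache)
    (hk : lru.contains (PySem.Str.lower city) = false)
    (hlen : ¬ cacheSize < (cache.length : Int) + 1) :
    solutionStep cacheSize (cache, ans, lru) city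
      = (cache ++ [PySem.Str.lower city], ans + 5,
          lru.insert (PySem.Str.lower city) 0) := by
  simp [solutionStep, hcs, hmem, hk, hlen]

lemma stepA_miss_evict (cacheSize : Int) (hcs : ¬ cacheSize = 0) (cache : List String)
    (ans : Int) (lru : PySem.Dict String Int) (city : String) (m : String)
    (hmem : PySem.Str.lower city ∉ cache)
    (hk : lru.contains (PySem.Str.lower city) = false)
    (hlen : cacheSize < (cache.length : Int) + 1)
    (hmin : PySem.List.min? (lru.insert (PySem.Str.lower city) 0).keys (fun x => x) = some m)
    (hm : m ∈ cache ++ [PySem.Str.lower city]) :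
    solutionStep cacheSize (cache, ans, lru) city
      = ((cache ++ [PySem.Str.lower city]).erase m, ans + 5,
          (lru.insert (PySem.Str.lower city) 0).erase m) := by
  have hrem := PySem.List.remove?_eq_some_erase (cache ++ [PySem.Str.lower city]) m hm
  simp [solutionStep, hcs, hmem, hk, hlen, hmin, hrem]

-- step characterisations of B ------------------------------------------------
lemma stepB_hit (cacheSize : Int) (present : PySem.Set String) (desc : List String)
    (ans : Int) (city : String)
    (hc : PySem.Str.lower city ∈ present) :
    solutionAltStep cacheSize (present, desc, ans) city = (present, desc, ans + 1) := by
  simp [solutionAltStep, PySem.Set.contains, hc]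

lemma stepB_miss_noevict (cacheSize : Int) (present : PySem.Set String) (desc : List String)
    (ans : Int) (city : String)
    (hc : PySem.Str.lower city ∉ present)
    (hlen : ¬ cacheSize < ((insertDesc (PySem.Str.lower city) desc).length : Int)) :
    solutionAltStep cacheSize (present, desc, ans) city
      = (present.add (PySem.Str.lower city), insertDesc (PySem.Str.lower city) desc,
          ans + 5) := by
  simp [solutionAltStep, PySem.Set.contains, hc, hlen]

lemma stepB_miss_evict (cacheSize : Int) (present : PySem.Set String) (desc : List String)
    (ans : Int) (city : String)
    (hc : PySem.Str.lower city ∉ present)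
    (hne : insertDesc (PySem.Str.lower city) desc ≠ [])
    (hlen : cacheSize < ((insertDesc (PySem.Str.lower city) desc).length : Int))
    (hpm : (insertDesc (PySem.Str.lower city) desc).getLast hne ∈ present
            ∨ (insertDesc (PySem.Str.lower city) desc).getLast hne = PySem.Str.lower city) :
    solutionAltStep cacheSize (present, desc, ans) city
      = ((present.add (PySem.Str.lower city)).discard
            ((insertDesc (PySem.Str.lower city) desc).getLast hne),
          (insertDesc (PySem.Str.lower city) desc).dropLast, ans + 5) := by
  have hpop : PySem.List.pop? (insertDesc (PySem.Str.lower city) desc)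
      = some ((insertDesc (PySem.Str.lower city) desc).getLast hne,
              (insertDesc (PySem.Str.lower city) desc).dropLast) := by
    conv_lhs => rw [← List.dropLast_append_getLast hne]
    exact PySem.List.pop?_last _ _
  simp [solutionAltStep, PySem.Set.contains, PySem.Set.remove?, PySem.Set.add,
    hc, hlen, hpop, hpm]

-- the main simulation invariant ---------------------------------------------
lemma fold_rel (cacheSize : Int) (hcs : ¬ cacheSize = 0) :
    ∀ (cities : List String) (cache : List String) (ans : Int)
      (lru : PySem.Dict String Int) (present : PySem.Set String) (desc : List String),
      lru.keys = cache →
      desc.Pairwise (· > ·) →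
      desc.Perm cache →
      (∀ x : String, x ∈ present ↔ x ∈ cache) →
      (if 0 < cacheSize then (cache.length : Int) ≤ cacheSize else cache = []) →
      (List.foldl (solutionStep cacheSize) (cache, ans, lru) cities).2.1
        = (List.foldl (solutionAltStep cacheSize) (present, desc, ans) cities).2.2 := by
  intro cities
  induction cities with
  | nil => intro _ _ _ _ _ _ _ _ _ _; rfl
  | cons city rest ih =>
    intro cache ans lru present desc hk hpw hperm hpres hsize
    have hnddesc : desc.Nodup := hpw.imp (fun h => ne_of_gt h)
    have hndcache : cache.Nodup := hperm.nodup_iff.mp hnddesc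
    by_cases hmem : PySem.Str.lower city ∈ cache
    · -- HIT
      have hkc : lru.contains (PySem.Str.lower city) = true := by
        rw [PySem.Dict.contains_iff_mem_keys, hk]; exact hmem
      have hlen : ¬ cacheSize < (cache.length : Int) := by
        by_cases h0 : 0 < cacheSize
        · rw [if_pos h0] at hsize; omega
        · rw [if_neg h0] at hsize; subst hsize; simp at hmem
      have hpc : PySem.Str.lower city ∈ present := (hpres _).mpr hmem
      rw [List.foldl_cons, List.foldl_cons,
        stepA_hit cacheSize hcs cache ans lru city hmem hkc hlen,
        stepB_hit cacheSize present desc ans city hpc]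
      have hk2 : (lru.modify (PySem.Str.lower city) 0 (· + 1)).keys = cache := by
        rw [PySem.Dict.keys_modify, PySem.Dict.keys_insert_of_contains _ _ hkc, hk]
      exact ih cache (ans + 1) _ present desc hk2 hpw hperm hpres hsize
    · -- MISS
      have hkc : lru.contains (PySem.Str.lower city) = false := by
        rw [Bool.eq_false_iff]
        intro h
        exact hmem (hk ▸ (PySem.Dict.contains_iff_mem_keys _ _).mp h)
      have hpc : PySem.Str.lower city ∉ present := fun h => hmem ((hpres _).mp h)
      have hcnd : PySem.Str.lower city ∉ desc := fun h => hmem (hperm.subset h)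
      have hperm1 : (insertDesc (PySem.Str.lower city) desc).Perm
          (cache ++ [PySem.Str.lower city]) :=
        (insertDesc_perm _ desc).trans
          ((hperm.cons _).trans (List.perm_append_singleton _ cache).symm)
      have hpw1 : (insertDesc (PySem.Str.lower city) desc).Pairwise (· > ·) :=
        insertDesc_pairwise hpw hcnd
      have hnd1 : (insertDesc (PySem.Str.lower city) desc).Nodup :=
        hpw1.imp (fun h => ne_of_gt h)
      have hlen1 : ((insertDesc (PySem.Str.lower city) desc).length : Int)
          = (cache.length : Int) + 1 := by
        rw [hperm1.length_eq]
        push_cast [List.length_append]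
        simp
      by_cases hev : cacheSize < (cache.length : Int) + 1
      · -- MISS + EVICT
        have hne1 : insertDesc (PySem.Str.lower city) desc ≠ [] := by
          intro h
          rw [h] at hlen1
          simp at hlen1
          omega
        set m := (insertDesc (PySem.Str.lower city) desc).getLast hne1 with hmdef
        have hsplit : insertDesc (PySem.Str.lower city) desc
            = (insertDesc (PySem.Str.lower city) desc).dropLast ++ [m] := by
          rw [hmdef]
          exact (List.dropLast_append_getLast hne1).symm
        have hkeys1 : (lru.insert (PySem.Str.lower city) 0).keys
            = cache ++ [PySem.Str.lower city] := by
          rw [PySem.Dict.keys_insert_of_not_contains _ _ hkc, hk]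
        have hmin : PySem.List.min? (lru.insert (PySem.Str.lower city) 0).keys
            (fun x => x) = some m := by
          rw [hkeys1]
          exact min?_eq_getLast hne1 hpw1 hperm1
        have hminmem : m ∈ cache ++ [PySem.Str.lower city] :=
          hperm1.subset (List.getLast_mem hne1)
        have hnd' : (cache ++ [PySem.Str.lower city]).Nodup := hperm1.nodup_iff.mp hnd1
        have hpm : m ∈ present ∨ m = PySem.Str.lower city := by
          rcases List.mem_append.mp hminmem with h | h
          · exact Or.inl ((hpres _).mpr h)
          · exact Or.inr (List.mem_singleton.mp h)
        rw [List.foldl_cons, List.foldl_cons,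
          stepA_miss_evict cacheSize hcs cache ans lru city m hmem hkc hev hmin hminmem,
          stepB_miss_evict cacheSize present desc ans city hpc hne1
            (by rw [hlen1]; exact hev) hpm]
        have hmnotdrop : m ∉ (insertDesc (PySem.Str.lower city) desc).dropLast := by
          have hnd2 := hnd1
          rw [hsplit, List.nodup_append] at hnd2
          intro hin
          exact hnd2.2.2 m hin m (by simp) rfl
        have herase : (insertDesc (PySem.Str.lower city) desc).erase m
            = (insertDesc (PySem.Str.lower city) desc).dropLast := by
          conv_lhs => rw [hsplit]
          rw [List.erase_append_right _ hmnotdrop]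
          simp
        have hk2 : ((lru.insert (PySem.Str.lower city) 0).erase m).keys
            = (cache ++ [PySem.Str.lower city]).erase m := by
          rw [keys_erase_eq, hkeys1, List.Nodup.erase_eq_filter hnd']
        have hpw2 : (insertDesc (PySem.Str.lower city) desc).dropLast.Pairwise (· > ·) :=
          hpw1.sublist (List.dropLast_sublist _)
        have hperm2 : (insertDesc (PySem.Str.lower city) desc).dropLast.Perm
            ((cache ++ [PySem.Str.lower city]).erase m) := by
          rw [← herase]
          exact hperm1.erase m
        have hpres2 : ∀ x : String,
            x ∈ (present.add (PySem.Str.lower city)).discard m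
              ↔ x ∈ (cache ++ [PySem.Str.lower city]).erase m := by
          intro x
          rw [PySem.Set.mem_discard, PySem.Set.mem_add, hnd'.mem_erase_iff]
          constructor
          · rintro ⟨h1, h2⟩
            refine ⟨h2, ?_⟩
            rcases h1 with h | h
            · exact List.mem_append.mpr (Or.inl ((hpres _).mp h))
            · exact List.mem_append.mpr (Or.inr (by simp [h]))
          · rintro ⟨h2, h1⟩
            refine ⟨?_, h2⟩
            rcases List.mem_append.mp h1 with h | h
            · exact Or.inl ((hpres _).mpr h)
            · exact Or.inr (List.mem_singleton.mp h)
        have hlen2 : (((cache ++ [PySem.Str.lower city]).erase m).length : Int)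
            = (cache.length : Int) := by
          rw [List.length_erase_of_mem hminmem, List.length_append]
          simp
        have hsize2 : if 0 < cacheSize
            then (((cache ++ [PySem.Str.lower city]).erase m).length : Int) ≤ cacheSize
            else (cache ++ [PySem.Str.lower city]).erase m = [] := by
          by_cases h0 : 0 < cacheSize
          · rw [if_pos h0, hlen2]
            rw [if_pos h0] at hsize
            exact hsize
          · rw [if_neg h0]
            rw [if_neg h0] at hsize
            have hz : (((cache ++ [PySem.Str.lower city]).erase m).length : Int) = 0 := by
              rw [hlen2, hsize]
              simp
            have hnat : ((cache ++ [PySem.Str.lower city]).erase m).length = 0 := by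
              omega
            exact List.eq_nil_of_length_eq_zero hnat
        exact ih _ (ans + 5) _ _ _ hk2 hpw2 hperm2 hpres2 hsize2
      · -- MISS, NO EVICTION
        have h0 : 0 < cacheSize := by
          by_cases h0 : 0 < cacheSize
          · exact h0
          · rw [if_neg h0] at hsize
            exfalso
            apply hev
            rw [hsize]
            simp
            omega
        rw [List.foldl_cons, List.foldl_cons,
          stepA_miss_noevict cacheSize hcs cache ans lru city hmem hkc hev,
          stepB_miss_noevict cacheSize present desc ans city hpc (by rw [hlen1]; exact hev)]
        have hkeys1 : (lru.insert (PySem.Str.lower city) 0).keys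
            = cache ++ [PySem.Str.lower city] := by
          rw [PySem.Dict.keys_insert_of_not_contains _ _ hkc, hk]
        have hpres1 : ∀ x : String,
            x ∈ present.add (PySem.Str.lower city)
              ↔ x ∈ cache ++ [PySem.Str.lower city] := by
          intro x
          rw [PySem.Set.mem_add, List.mem_append]
          constructor
          · rintro (h | h)
            · exact Or.inl ((hpres _).mp h)
            · exact Or.inr (by simp [h])
          · rintro (h | h)
            · exact Or.inl ((hpres _).mpr h)
            · exact Or.inr (List.mem_singleton.mp h)
        have hsize1 : if 0 < cacheSize
            then ((cache ++ [PySem.Str.lower city]).length : Int) ≤ cacheSize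
            else cache ++ [PySem.Str.lower city] = [] := by
          rw [if_pos h0, List.length_append]
          push_cast
          simp
          all_goals omega
        exact ih _ (ans + 5) _ _ _ hkeys1 hpw1 hperm1 hpres1 hsize1

-- ===== VERDICT (by name: the statement is the Claim_ definition above) =====
theorem solution_spec : Claim_equal_solution := by
  unfold Claim_equal_solution
  intro cacheSize cities _
  unfold Spec_solution solution solution_alt
  by_cases h : cacheSize = 0
  · subst h
    rw [if_pos rfl, foldA_zero]
    push_cast
    ring
  · rw [if_neg h]
    exact fold_rel cacheSize h cities [] 0 PySem.Dict.empty PySem.Set.empty []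
      rfl (List.Pairwise.nil) (List.Perm.refl _) (by intro x; simp [PySem.Set.empty])
      (by by_cases h0 : 0 < cacheSize
          · rw [if_pos h0]
            simp
            all_goals omega
          · rw [if_neg h0])
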